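-- pv_equiv track=rewrite | github.com/ahanaf019/CSE3132-DSP-python | signal_operations.py | MultiplySignals
-- ===== SOURCE A (Python) =====
-- def MultiplySignals(n1, n2, x1, x2):
--     nmin = min(min(n1), min(n2))
--     nmax = max(max(n1), max(n2))
--
--     n = []
--     y1 = []
--     y2 = []
--     y1c = False
--     y2c = False
--
--     i = nmin
--     while(i <= nmax):
--         n.append(i)
--
--         if i >= min(n1) and i <= max(n1):
--             if(not y1c):
--                     for elem in x1:
--                         y1.append(elem)
--                     y1c = True
--         else:
--
--             y1.append(0)
--
--         if i >= min(n2) and i <= max(n2):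
--             if(not y2c):
--                     for elem in x2:
--                         y2.append(elem)
--                     y2c = True
--         else:
--             y2.append(0)
--         i += 1
--
--     y = []
--     for i in range(0, len(n)):
--         y.append(y1[i] * y2[i])
--
--     return n, y
-- ===== SOURCE B (Python) =====
-- def MultiplySignals(n1, n2, x1, x2):
--     nmin = min(min(n1), min(n2))
--     nmax = max(max(n1), max(n2))
--     n = list(range(nmin, nmax + 1))
--     y1 = [0] * (min(n1) - nmin) + list(x1) + [0] * (nmax - max(n1))
--     y2 = [0] * (min(n2) - nmin) + list(x2) + [0] * (nmax - max(n2))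
--     y = [y1[i] * y2[i] for i in range(len(n))]
--     return n, y
-- ===== Notes on version B (the rewrite author's own statement) =====
-- stated objective: simpler
-- what changed: Replaces A's stateful while-loop with dump-once flags by direct construction: the aligned signals are built as zero-padded concatenations and multiplied with a comprehension.
import Mathlib
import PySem

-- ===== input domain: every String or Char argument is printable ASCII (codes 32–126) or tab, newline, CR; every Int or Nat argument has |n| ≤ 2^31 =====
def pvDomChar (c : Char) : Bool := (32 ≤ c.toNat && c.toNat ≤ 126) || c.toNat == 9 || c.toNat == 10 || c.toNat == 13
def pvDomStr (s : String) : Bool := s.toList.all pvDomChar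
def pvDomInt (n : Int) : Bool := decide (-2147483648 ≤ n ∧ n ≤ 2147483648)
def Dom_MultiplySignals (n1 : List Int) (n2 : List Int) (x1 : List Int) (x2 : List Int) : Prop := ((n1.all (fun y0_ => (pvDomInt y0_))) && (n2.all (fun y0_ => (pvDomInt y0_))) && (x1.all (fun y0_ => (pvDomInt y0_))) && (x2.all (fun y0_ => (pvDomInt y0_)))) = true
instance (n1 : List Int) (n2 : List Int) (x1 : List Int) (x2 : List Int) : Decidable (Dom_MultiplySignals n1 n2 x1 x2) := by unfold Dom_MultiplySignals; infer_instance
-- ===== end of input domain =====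

-- B replaces A's stateful while-loop (dump-once flags, per-element appends) by building the
-- aligned signals directly as zero-padded concatenations and multiplying with a comprehension (objective: simpler).

-- ===== PORT A =====
-- the body of A's per-iteration update of one (yk, ykc) pair, branches in A's order
def pvStepY (mn mx : Int) (x : List Int) (st : List Int × Bool) (i : Int) : List Int × Bool :=
  if mn ≤ i ∧ i ≤ mx then
    (if st.2 = false then (st.1 ++ x, true) else st)
  else (st.1 ++ [0], st.2)

def MultiplySignals (n1 : List Int) (n2 : List Int) (x1 : List Int) (x2 : List Int) : List Int × List Int :=
  let mn1 := (PySem.List.min? n1 (fun y => y)).getD 0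
  let mx1 := (PySem.List.max? n1 (fun y => y)).getD 0
  let mn2 := (PySem.List.min? n2 (fun y => y)).getD 0
  let mx2 := (PySem.List.max? n2 (fun y => y)).getD 0
  let nmin := min mn1 mn2
  let nmax := max mx1 mx2
  -- while i <= nmax, state (n, (y1, y1c), (y2, y2c))
  let st := (PySem.List.pyRange nmin (nmax + 1) 1).foldl
    (fun st i => (st.1 ++ [i], pvStepY mn1 mx1 x1 st.2.1 i, pvStepY mn2 mx2 x2 st.2.2 i))
    ([], ([], false), ([], false))
  let n := st.1
  let y1 := st.2.1.1
  let y2 := st.2.2.1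
  let y := (List.range n.length).foldl
    (fun acc (i : Nat) => acc ++ [PySem.List.pyGetD y1 ((i : Nat) : Int) 0 * PySem.List.pyGetD y2 ((i : Nat) : Int) 0]) []
  (n, y)

-- ===== PORT B =====
def MultiplySignals_alt (n1 : List Int) (n2 : List Int) (x1 : List Int) (x2 : List Int) : List Int × List Int :=
  let mn1 := (PySem.List.min? n1 (fun y => y)).getD 0
  let mx1 := (PySem.List.max? n1 (fun y => y)).getD 0
  let mn2 := (PySem.List.min? n2 (fun y => y)).getD 0
  let mx2 := (PySem.List.max? n2 (fun y => y)).getD 0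
  let nmin := min mn1 mn2
  let nmax := max mx1 mx2
  let n := PySem.List.pyRange nmin (nmax + 1) 1
  let y1 := List.replicate (mn1 - nmin).toNat 0 ++ x1 ++ List.replicate (nmax - mx1).toNat 0
  let y2 := List.replicate (mn2 - nmin).toNat 0 ++ x2 ++ List.replicate (nmax - mx2).toNat 0
  let y := (List.range n.length).map
    (fun (i : Nat) => PySem.List.pyGetD y1 ((i : Nat) : Int) 0 * PySem.List.pyGetD y2 ((i : Nat) : Int) 0)
  (n, y)

-- ===== PRECONDITION & SPEC =====
-- Pre_ excludes exactly the inputs on which A raises: an empty n1/n2 (ValueError at min/max)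
-- and inputs whose x-list is shorter than its index span (IndexError in the multiply loop).
def Pre_MultiplySignals (n1 : List Int) (n2 : List Int) (x1 : List Int) (x2 : List Int) : Prop :=
  n1 ≠ [] ∧ n2 ≠ [] ∧
  ((PySem.List.max? n1 (fun y => y)).getD 0 - (PySem.List.min? n1 (fun y => y)).getD 0 + 1 ≤ (x1.length : Int)) ∧
  ((PySem.List.max? n2 (fun y => y)).getD 0 - (PySem.List.min? n2 (fun y => y)).getD 0 + 1 ≤ (x2.length : Int))
instance (n1 : List Int) (n2 : List Int) (x1 : List Int) (x2 : List Int) : Decidable (Pre_MultiplySignals n1 n2 x1 x2) := by unfold Pre_MultiplySignals; infer_instance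

def pvWitness_MultiplySignals : List Int × List Int × List Int × List Int :=
  ([0, 1], [2], [5, 6], [7])

def Spec_MultiplySignals (n1 : List Int) (n2 : List Int) (x1 : List Int) (x2 : List Int) (out : List Int × List Int) : Prop := out = MultiplySignals_alt n1 n2 x1 x2
instance (n1 : List Int) (n2 : List Int) (x1 : List Int) (x2 : List Int) (out : List Int × List Int) : Decidable (Spec_MultiplySignals n1 n2 x1 x2 out) := by unfold Spec_MultiplySignals; infer_instance

-- ===== CLAIM (what is proved, stated in full; the proofs are below) =====
def Claim_equal_MultiplySignals : Prop := ∀ (n1 : List Int) (n2 : List Int) (x1 : List Int) (x2 : List Int), Dom_MultiplySignals n1 n2 x1 x2 → Pre_MultiplySignals n1 n2 x1 x2 → Spec_MultiplySignals n1 n2 x1 x2 (MultiplySignals n1 n2 x1 x2)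

-- ===== LEMMAS AND PROOFS =====

-- A's combined fold splits into three independent folds
theorem pv_fold_split (f g : List Int × Bool → Int → List Int × Bool) (l : List Int)
    (a : List Int) (b c : List Int × Bool) :
    l.foldl (fun st i => (st.1 ++ [i], f st.2.1 i, g st.2.2 i)) (a, b, c)
      = (l.foldl (fun n i => n ++ [i]) a, l.foldl f b, l.foldl g c) := by
  induction l generalizing a b c with
  | nil => rfl
  | cons h t ih => simp only [List.foldl_cons]; exact ih _ _ _

theorem pv_foldl_snoc (l : List Int) (a : List Int) :
    l.foldl (fun n i => n ++ [i]) a = a ++ l := by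
  induction l generalizing a with
  | nil => simp
  | cons h t ih => simpa using ih (a ++ [h])

theorem pv_foldl_map {α : Type} (f : α → Int) (l : List α) (acc : List Int) :
    l.foldl (fun acc i => acc ++ [f i]) acc = acc ++ l.map f := by
  induction l generalizing acc with
  | nil => simp
  | cons h t ih => simpa using ih (acc ++ [f h])

-- off-range indices append a zero, regardless of the flag
theorem pv_stepY_zeros (mn mx : Int) (x : List Int) (l : List Int)
    (hl : ∀ i ∈ l, ¬(mn ≤ i ∧ i ≤ mx)) (ys : List Int) (c : Bool) :
    l.foldl (pvStepY mn mx x) (ys, c) = (ys ++ List.replicate l.length 0, c) := by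
  induction l generalizing ys with
  | nil => simp
  | cons h t ih =>
    have hh := hl h (by simp)
    simp only [List.foldl_cons, pvStepY, if_neg hh]
    rw [ih (fun i hi => hl i (by simp [hi])) (ys ++ [0])]
    simp [List.replicate_succ]

-- in-range indices after the dump change nothing
theorem pv_stepY_done (mn mx : Int) (x : List Int) (l : List Int)
    (hl : ∀ i ∈ l, mn ≤ i ∧ i ≤ mx) (ys : List Int) :
    l.foldl (pvStepY mn mx x) (ys, true) = (ys, true) := by
  induction l with
  | nil => rfl
  | cons h t ih =>
    have hh := hl h (by simp)
    simp only [List.foldl_cons, pvStepY, if_pos hh]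
    exact ih (fun i hi => hl i (by simp [hi]))

-- the whole per-signal fold is the zero-padded concatenation
theorem pv_stepY_total (mn mx nmin nmax : Int) (x : List Int)
    (h1 : nmin ≤ mn) (h2 : mn ≤ mx) (h3 : mx ≤ nmax) :
    (PySem.List.pyRange nmin (nmax + 1) 1).foldl (pvStepY mn mx x) ([], false)
      = (List.replicate (mn - nmin).toNat 0 ++ x ++ List.replicate (nmax - mx).toNat 0, true) := by
  rw [PySem.List.pyRange_one_append nmin mn (nmax + 1) h1 (by omega),
      PySem.List.pyRange_one_append mn (mx + 1) (nmax + 1) (by omega) (by omega),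
      PySem.List.pyRange_one_cons (by omega : mn < mx + 1)]
  rw [List.foldl_append,
      pv_stepY_zeros mn mx x _ (fun i hi => by
        rw [PySem.List.mem_pyRange_one] at hi; omega) [] false]
  simp only [List.foldl_append, List.foldl_cons, pvStepY]
  rw [if_pos ⟨le_refl mn, h2⟩]
  rw [if_pos trivial]
  rw [pv_stepY_done mn mx x _ (fun i hi => by
        rw [PySem.List.mem_pyRange_one] at hi; omega)]
  rw [pv_stepY_zeros mn mx x _ (fun i hi => by
        rw [PySem.List.mem_pyRange_one] at hi; omega)]
  rw [PySem.List.length_pyRange_one, PySem.List.length_pyRange_one]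
  have h4 : (nmax + 1 - (mx + 1)).toNat = (nmax - mx).toNat := by omega
  rw [h4]
  simp

theorem pv_min_le_max (l : List Int) (hl : l ≠ []) :
    (PySem.List.min? l (fun y => y)).getD 0 ≤ (PySem.List.max? l (fun y => y)).getD 0 := by
  obtain ⟨m, hm⟩ : ∃ m, PySem.List.min? l (fun y => y) = some m := by
    cases h : PySem.List.min? l (fun y => y) with
    | none => exact absurd ((PySem.List.min?_eq_none_iff l (fun y => y)).mp h) hl
    | some m => exact ⟨m, rfl⟩
  obtain ⟨M, hM⟩ : ∃ M, PySem.List.max? l (fun y => y) = some M := by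
    cases h : PySem.List.max? l (fun y => y) with
    | none => exact absurd ((PySem.List.max?_eq_none_iff l (fun y => y)).mp h) hl
    | some M => exact ⟨M, rfl⟩
  have hmem := PySem.List.min?_mem hm
  have hle := PySem.List.max?_isMax hM m hmem
  simp [hm, hM]
  exact hle

-- ===== VERDICT (by name: the statement is the Claim_ definition above) =====
theorem MultiplySignals_spec : Claim_equal_MultiplySignals := by
  intro n1 n2 x1 x2 _ hpre
  obtain ⟨h1, h2, _, _⟩ := hpre
  show MultiplySignals n1 n2 x1 x2 = MultiplySignals_alt n1 n2 x1 x2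
  unfold MultiplySignals MultiplySignals_alt
  simp only []
  set mn1 := (PySem.List.min? n1 (fun y => y)).getD 0 with hmn1
  set mx1 := (PySem.List.max? n1 (fun y => y)).getD 0 with hmx1
  set mn2 := (PySem.List.min? n2 (fun y => y)).getD 0 with hmn2
  set mx2 := (PySem.List.max? n2 (fun y => y)).getD 0 with hmx2
  have hm1 : mn1 ≤ mx1 := pv_min_le_max n1 h1
  have hm2 : mn2 ≤ mx2 := pv_min_le_max n2 h2
  rw [pv_fold_split, pv_foldl_snoc,
      pv_stepY_total mn1 mx1 (min mn1 mn2) (max mx1 mx2) x1 (min_le_left _ _) hm1 (le_max_left _ _),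
      pv_stepY_total mn2 mx2 (min mn1 mn2) (max mx1 mx2) x2 (min_le_right _ _) hm2 (le_max_right _ _)]
  simp only [List.nil_append]
  rw [pv_foldl_map]
  simp
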